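-- pv_equiv track=rewrite | github.com/House1904/Final_Project_AI | solvers/csp_solver.py | compute_degrees
-- ===== SOURCE A (Python) =====
-- from collections import defaultdict
--
-- def compute_degrees(start_goals, ROWS, COLS):
--     color_neighbors = defaultdict(set)
--     color_positions = {c: [start, goal] for c, (start, goal) in start_goals.items()}
--     for c1, positions1 in color_positions.items():
--         for c2, positions2 in color_positions.items():
--             if c1 == c2:
--                 continue
--             for p1 in positions1:
--                 for p2 in positions2:
--                     if abs(p1[0] - p2[0]) + abs(p1[1] - p2[1]) == 1:
--                         color_neighbors[c1].add(c2)
--     return {c: len(neigh) for c, neigh in color_neighbors.items()}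
-- ===== SOURCE B (Python) =====
-- def compute_degrees(start_goals, ROWS, COLS):
--     # Index every start/goal cell -> set of colors occupying it, then probe the
--     # 4 grid neighbors of each color's two cells: O(C) instead of O(C^2).
--     pos_colors = {}
--     for c, (start, goal) in start_goals.items():
--         for p in (start, goal):
--             pos_colors.setdefault(p, set()).add(c)
--     result = {}
--     for c, (start, goal) in start_goals.items():
--         neigh = set()
--         for p in (start, goal):
--             for dx, dy in ((1, 0), (-1, 0), (0, 1), (0, -1)):
--                 for c2 in pos_colors.get((p[0] + dx, p[1] + dy), ()):
--                     if c2 != c: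
--                         neigh.add(c2)
--         if neigh:
--             result[c] = len(neigh)
--     return result
-- ===== Notes on version B (the rewrite author's own statement) =====
-- stated objective: faster
-- what changed: Instead of comparing every pair of colors' positions (O(C^2)), B builds one position->colors index and probes the 4 grid neighbors of each color's two cells, collecting adjacent colors in O(C).
import Mathlib
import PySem

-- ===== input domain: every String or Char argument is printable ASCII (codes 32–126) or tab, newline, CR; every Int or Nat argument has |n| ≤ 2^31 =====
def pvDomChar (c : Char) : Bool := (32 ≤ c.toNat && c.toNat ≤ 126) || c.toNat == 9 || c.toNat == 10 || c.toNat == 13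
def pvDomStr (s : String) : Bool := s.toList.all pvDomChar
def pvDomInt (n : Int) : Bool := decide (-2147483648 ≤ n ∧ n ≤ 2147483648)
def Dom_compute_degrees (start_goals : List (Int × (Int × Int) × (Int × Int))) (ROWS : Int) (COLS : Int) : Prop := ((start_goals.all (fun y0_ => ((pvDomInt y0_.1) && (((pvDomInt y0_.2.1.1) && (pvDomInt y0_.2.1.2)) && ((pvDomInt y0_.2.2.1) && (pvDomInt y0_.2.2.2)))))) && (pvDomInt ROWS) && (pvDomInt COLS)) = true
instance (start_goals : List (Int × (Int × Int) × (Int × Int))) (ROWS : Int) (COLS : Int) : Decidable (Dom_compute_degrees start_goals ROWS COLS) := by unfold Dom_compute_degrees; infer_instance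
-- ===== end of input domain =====

-- B replaces A's all-pairs color scan by a position→colors index probed at the 4 grid
-- neighbours of each color's two cells (objective: faster).

-- ===== PORT A =====
-- (both Pythons receive start_goals as a dict: the association list passes the call
--  boundary as a Python dict, modelled by PySem.Dict.ofList)
def compute_degrees (start_goals : List (Int × (Int × Int) × (Int × Int))) (ROWS : Int) (COLS : Int) : List (Int × Int) :=
  let sg := PySem.Dict.ofList start_goals
  -- color_positions = {c: [start, goal] for c, (start, goal) in start_goals.items()}
  -- (the comprehension's keys are sg's keys, already unique: its items are this map, in order)
  let color_positions : List (Int × List (Int × Int)) :=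
    sg.items.map (fun x => (x.1, [x.2.1, x.2.2]))
  let color_neighbors : PySem.Dict Int (PySem.Set Int) :=
    color_positions.foldl (fun cn x =>
      color_positions.foldl (fun cn y =>
        if x.1 == y.1 then cn else
        x.2.foldl (fun cn p1 =>
          y.2.foldl (fun cn p2 =>
            if ((p1.1 - p2.1).natAbs + (p1.2 - p2.2).natAbs == 1)
            then cn.modify x.1 PySem.Set.empty (fun s => PySem.Set.add s y.1)  -- color_neighbors[c1].add(c2)
            else cn) cn) cn) cn) PySem.Dict.empty
  color_neighbors.items.map (fun p => (p.1, PySem.Set.len p.2))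

-- ===== PORT B =====
def pvDeltas : List (Int × Int) := [(1, 0), (-1, 0), (0, 1), (0, -1)]

def compute_degrees_alt (start_goals : List (Int × (Int × Int) × (Int × Int))) (ROWS : Int) (COLS : Int) : List (Int × Int) :=
  let sg := PySem.Dict.ofList start_goals
  let pos_colors : PySem.Dict (Int × Int) (PySem.Set Int) :=
    sg.items.foldl (fun pc x =>
      [x.2.1, x.2.2].foldl (fun pc p =>
        pc.modify p PySem.Set.empty (fun s => PySem.Set.add s x.1)) pc)   -- setdefault(p, set()).add(c)
      PySem.Dict.empty
  sg.items.foldl (fun res x =>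
    let neigh : PySem.Set Int :=
      [x.2.1, x.2.2].foldl (fun n p =>
        pvDeltas.foldl (fun n d =>
          (pos_colors.getD (p.1 + d.1, p.2 + d.2) PySem.Set.empty).foldl (fun n c2 =>
            if c2 != x.1 then PySem.Set.add n c2 else n) n) n) PySem.Set.empty
    if neigh.isEmpty then res else res ++ [(x.1, PySem.Set.len neigh)]) []

-- ===== PRECONDITION & SPEC =====
def Spec_compute_degrees (start_goals : List (Int × (Int × Int) × (Int × Int))) (ROWS : Int) (COLS : Int) (out : List (Int × Int)) : Prop := out = compute_degrees_alt start_goals ROWS COLS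
instance (start_goals : List (Int × (Int × Int) × (Int × Int))) (ROWS : Int) (COLS : Int) (out : List (Int × Int)) : Decidable (Spec_compute_degrees start_goals ROWS COLS out) := by unfold Spec_compute_degrees; infer_instance

-- ===== CLAIM (what is proved, stated in full; the proofs are below) =====
def Claim_equal_compute_degrees : Prop := ∀ (start_goals : List (Int × (Int × Int) × (Int × Int))) (ROWS : Int) (COLS : Int), Dom_compute_degrees start_goals ROWS COLS → Spec_compute_degrees start_goals ROWS COLS (compute_degrees start_goals ROWS COLS)

-- ===== LEMMAS AND PROOFS =====

-- the Manhattan-adjacency test of A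
def pvAdj (p1 p2 : Int × Int) : Bool := (p1.1 - p2.1).natAbs + (p1.2 - p2.2).natAbs == 1

-- the colors A adds to color_neighbors[c1] during c1's outer iteration, flattened to one list
def pvEventsA (cp : List (Int × List (Int × Int))) (c1 : Int) (ps1 : List (Int × Int)) : List Int :=
  cp.flatMap (fun y => if c1 == y.1 then [] else
    ps1.flatMap (fun p1 => (y.2.filter (fun p2 => pvAdj p1 p2)).map (fun _ => y.1)))

-- the colors B adds to neigh for an entry x, flattened to one list
def pvEventsB (pc : PySem.Dict (Int × Int) (PySem.Set Int)) (x : Int × (Int × Int) × (Int × Int)) : List Int :=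
  [x.2.1, x.2.2].flatMap (fun p =>
    pvDeltas.flatMap (fun d =>
      (pc.getD (p.1 + d.1, p.2 + d.2) PySem.Set.empty).filter (fun c2 => c2 != x.1)))

-- A's inner two loops for a fixed x are the fold of single-key modifies over pvEventsA
lemma pvA_flatten (cp : List (Int × List (Int × Int))) (x : Int × List (Int × Int))
    (cn : PySem.Dict Int (PySem.Set Int)) :
    cp.foldl (fun cn y =>
        if x.1 == y.1 then cn else
        x.2.foldl (fun cn p1 =>
          y.2.foldl (fun cn p2 =>
            if ((p1.1 - p2.1).natAbs + (p1.2 - p2.2).natAbs == 1)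
            then cn.modify x.1 PySem.Set.empty (fun s => PySem.Set.add s y.1)
            else cn) cn) cn) cn
      = (pvEventsA cp x.1 x.2).foldl
          (fun cn c2 => cn.modify x.1 PySem.Set.empty (fun s => PySem.Set.add s c2)) cn := by
  rw [pvEventsA, List.foldl_flatMap]
  apply PySem.List.foldl_congr_mem
  intro acc y _
  by_cases h : (x.1 == y.1) = true
  · simp [h]
  · simp only [h, Bool.false_eq_true, if_false, List.foldl_flatMap]
    apply PySem.List.foldl_congr_mem
    intro acc2 p1 _
    rw [List.foldl_map, List.foldl_filter]
    simp [pvAdj]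

-- repeatedly modifying the LAST key of a dict updates that entry in place
lemma pvItems_foldl_modify_last (l : List Int) (k : Int) :
    ∀ (pre : List (Int × PySem.Set Int)) (s : PySem.Set Int)
      (d : PySem.Dict Int (PySem.Set Int)),
      d.items = pre ++ [(k, s)] → (∀ q ∈ pre, q.1 ≠ k) → (pre.map (·.1)).Nodup →
      (l.foldl (fun d c2 => d.modify k PySem.Set.empty (fun s => PySem.Set.add s c2)) d).items
        = pre ++ [(k, PySem.Set.update s l)] := by
  induction l with
  | nil => intro pre s d hd _ _; simpa [PySem.Set.update] using hd
  | cons e rest ih =>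
    intro pre s d hd hpre hprend
    have hkeys : d.keys = pre.map (·.1) ++ [k] := by
      show d.items.map (·.1) = _
      rw [hd]; simp
    have hnd : d.keys.Nodup := by
      rw [hkeys]
      simp only [List.nodup_append, List.nodup_cons, List.not_mem_nil, not_false_iff,
        List.nodup_nil, and_true, true_and]
      exact ⟨hprend, by simpa using fun q hq hq2 => hpre q hq hq2⟩
    have hmem : (k, s) ∈ d.items := by rw [hd]; simp
    have hget : d.getD k PySem.Set.empty = s :=
      PySem.Dict.getD_of_mem_items d hmem hnd _
    have hcont : d.contains k = true := by
      rw [PySem.Dict.contains_iff_mem_keys, hkeys]; simp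
    have hstep : (d.modify k PySem.Set.empty (fun s => PySem.Set.add s e)).items
        = pre ++ [(k, PySem.Set.add s e)] := by
      show (d.insert k _).items = _
      rw [PySem.Dict.items_insert_of_contains d _ hcont, hd, hget]
      rw [List.map_append]
      congr 1
      · rw [List.map_congr_left (g := id) (fun q hq => by simp [hpre q hq]), List.map_id]
      · simp
    simp only [List.foldl_cons]
    have := ih pre (PySem.Set.add s e) _ hstep hpre hprend
    rw [this]
    simp [PySem.Set.update]

-- folding single-key modifies over a FRESH key appends the entry (k, set(l)), if any
lemma pvItems_foldl_modify_fresh (l : List Int) (k : Int) (d : PySem.Dict Int (PySem.Set Int))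
    (h : d.contains k = false) (hnd : d.keys.Nodup) :
    (l.foldl (fun d c2 => d.modify k PySem.Set.empty (fun s => PySem.Set.add s c2)) d).items
      = if l = [] then d.items else d.items ++ [(k, PySem.Set.ofList l)] := by
  cases l with
  | nil => simp
  | cons e rest =>
    simp only [List.foldl_cons]
    have hget : d.getD k PySem.Set.empty = PySem.Set.empty :=
      PySem.Dict.getD_of_not_contains d _ h
    have hstep : (d.modify k PySem.Set.empty (fun s => PySem.Set.add s e)).items
        = d.items ++ [(k, PySem.Set.add PySem.Set.empty e)] := by
      show (d.insert k _).items = _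
      rw [PySem.Dict.items_insert_of_not_contains d _ h, hget]
    have hpre : ∀ q ∈ d.items, q.1 ≠ k := by
      intro q hq hqk
      have : k ∈ d.keys := by
        show k ∈ d.items.map (·.1)
        exact List.mem_map.mpr ⟨q, hq, hqk⟩
      rw [← PySem.Dict.contains_iff_mem_keys] at this
      simp [h] at this
    have := pvItems_foldl_modify_last rest k d.items _ _ hstep hpre hnd
    rw [this]
    simp [PySem.Set.ofList_eq_foldl, PySem.Set.update, PySem.Set.empty]

-- A's whole outer loop, by items: one appended entry per color with a nonempty event list
lemma pvA_outer (cp : List (Int × List (Int × Int))) (todo : List (Int × List (Int × Int)))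
    (cn : PySem.Dict Int (PySem.Set Int))
    (hnd : (todo.map (·.1)).Nodup) (hkeys : cn.keys.Nodup)
    (hfresh : ∀ x ∈ todo, cn.contains x.1 = false) :
    (todo.foldl (fun cn x =>
        cp.foldl (fun cn y =>
          if x.1 == y.1 then cn else
          x.2.foldl (fun cn p1 =>
            y.2.foldl (fun cn p2 =>
              if ((p1.1 - p2.1).natAbs + (p1.2 - p2.2).natAbs == 1)
              then cn.modify x.1 PySem.Set.empty (fun s => PySem.Set.add s y.1)
              else cn) cn) cn) cn) cn).items
      = cn.items ++ (todo.filter (fun x => !(pvEventsA cp x.1 x.2).isEmpty)).map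
          (fun x => (x.1, PySem.Set.ofList (pvEventsA cp x.1 x.2))) := by
  induction todo generalizing cn with
  | nil => simp
  | cons x rest ih =>
    simp only [List.foldl_cons]
    rw [pvA_flatten]
    have hx : cn.contains x.1 = false := hfresh x (by simp)
    have hitems := pvItems_foldl_modify_fresh (pvEventsA cp x.1 x.2) x.1 cn hx hkeys
    set cn' := (pvEventsA cp x.1 x.2).foldl
      (fun cn c2 => cn.modify x.1 PySem.Set.empty (fun s => PySem.Set.add s c2)) cn with hcn'
    have hkeys' : cn'.keys = if pvEventsA cp x.1 x.2 = [] then cn.keys else cn.keys ++ [x.1] := by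
      show cn'.items.map (·.1) = _
      rw [hitems]
      split <;> simp [PySem.Dict.keys]
    have hnd' : cn'.keys.Nodup := by
      rw [hkeys']
      split
      · exact hkeys
      · have hxk : x.1 ∉ cn.keys := by
          rw [← PySem.Dict.contains_iff_mem_keys]; simp [hx]
        refine hkeys.append (by simp) ?_
        intro a ha hb
        rw [List.mem_singleton] at hb
        exact hxk (hb ▸ ha)
    have hfresh' : ∀ z ∈ rest, cn'.contains z.1 = false := by
      intro z hz
      have hne : z.1 ≠ x.1 := by
        simp only [List.map_cons, List.nodup_cons] at hnd
        intro he
        exact hnd.1 (he ▸ List.mem_map.mpr ⟨z, hz, rfl⟩)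
      have hzc : cn.contains z.1 = false := hfresh z (by simp [hz])
      rw [← Bool.not_eq_true, PySem.Dict.contains_iff_mem_keys, hkeys']
      split
      · rw [← PySem.Dict.contains_iff_mem_keys]; simp [hzc]
      · simp only [List.mem_append, List.mem_singleton]
        rintro (hm | hm)
        · rw [← PySem.Dict.contains_iff_mem_keys] at hm; simp [hzc] at hm
        · exact hne hm
    have hrest := ih cn' (by simpa using hnd.of_cons) hnd' hfresh'
    rw [hrest, hitems]
    by_cases he : pvEventsA cp x.1 x.2 = []
    · simp [he]
    · simp [he, List.append_assoc]

-- membership in B's position index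
lemma pvPos_mem_gen (L : List (Int × (Int × Int) × (Int × Int))) :
    ∀ (pc : PySem.Dict (Int × Int) (PySem.Set Int)) (q : Int × Int) (c : Int),
    (c ∈ (L.foldl (fun pc x =>
          [x.2.1, x.2.2].foldl (fun pc p =>
            pc.modify p PySem.Set.empty (fun s => PySem.Set.add s x.1)) pc) pc).getD q PySem.Set.empty
      ↔ c ∈ pc.getD q PySem.Set.empty ∨ ∃ x ∈ L, c = x.1 ∧ (q = x.2.1 ∨ q = x.2.2)) := by
  induction L with
  | nil => simp
  | cons z rest ih =>
    intro pc q c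
    rw [List.foldl_cons, ih]
    have h2 : ∀ (d : PySem.Dict (Int × Int) (PySem.Set Int)) (p : Int × Int),
        c ∈ (d.modify p PySem.Set.empty (fun s => PySem.Set.add s z.1)).getD q PySem.Set.empty
          ↔ c ∈ d.getD q PySem.Set.empty ∨ (q = p ∧ c = z.1) := by
      intro d p
      rw [PySem.Dict.getD_modify]
      split_ifs with h
      · subst h; rw [PySem.Set.mem_add]; tauto
      · tauto
    simp only [List.foldl_cons, List.foldl_nil, h2, List.mem_cons]
    constructor
    · rintro (((h | h) | h) | ⟨x, hx, h⟩)
      · exact Or.inl h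
      · exact Or.inr ⟨z, Or.inl rfl, h.2, Or.inl h.1⟩
      · exact Or.inr ⟨z, Or.inl rfl, h.2, Or.inr h.1⟩
      · exact Or.inr ⟨x, Or.inr hx, h⟩
    · rintro (h | ⟨x, (rfl | hx), hc, hq⟩)
      · tauto
      · rcases hq with hq | hq
        · exact Or.inl (Or.inl (Or.inr ⟨hq, hc⟩))
        · exact Or.inl (Or.inr ⟨hq, hc⟩)
      · exact Or.inr ⟨x, hx, hc, hq⟩

-- B's neigh accumulation for an entry x is the set of pvEventsB
lemma pvB_neigh (pc : PySem.Dict (Int × Int) (PySem.Set Int)) (x : Int × (Int × Int) × (Int × Int)) :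
    [x.2.1, x.2.2].foldl (fun n p =>
        pvDeltas.foldl (fun n d =>
          (pc.getD (p.1 + d.1, p.2 + d.2) PySem.Set.empty).foldl (fun n c2 =>
            if c2 != x.1 then PySem.Set.add n c2 else n) n) n) PySem.Set.empty
      = PySem.Set.ofList (pvEventsB pc x) := by
  rw [PySem.Set.ofList_eq_foldl, pvEventsB, List.foldl_flatMap]
  apply PySem.List.foldl_congr_mem
  intro acc p _
  rw [List.foldl_flatMap]
  apply PySem.List.foldl_congr_mem
  intro acc2 d _
  rw [List.foldl_filter]

-- adjacency ↔ being one of the 4 probed neighbours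
lemma pvAdj_iff (p1 p2 : Int × Int) :
    pvAdj p1 p2 = true ↔ ∃ d ∈ pvDeltas, p2 = (p1.1 + d.1, p1.2 + d.2) := by
  simp only [pvAdj, pvDeltas, beq_iff_eq, List.mem_cons, List.not_mem_nil, or_false]
  constructor
  · intro h
    have hc : (p1.1 - p2.1 = 1 ∧ p1.2 = p2.2) ∨ (p1.1 - p2.1 = -1 ∧ p1.2 = p2.2)
        ∨ (p1.2 - p2.2 = 1 ∧ p1.1 = p2.1) ∨ (p1.2 - p2.2 = -1 ∧ p1.1 = p2.1) := by omega
    rcases hc with ⟨h1, h2⟩ | ⟨h1, h2⟩ | ⟨h1, h2⟩ | ⟨h1, h2⟩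
    · exact ⟨(-1, 0), by tauto, by cases p2; simp_all; omega⟩
    · exact ⟨(1, 0), by tauto, by cases p2; simp_all; omega⟩
    · exact ⟨(0, -1), by tauto, by cases p2; simp_all; omega⟩
    · exact ⟨(0, 1), by tauto, by cases p2; simp_all; omega⟩
  · rintro ⟨d, hd, rfl⟩
    rcases hd with rfl | rfl | rfl | rfl <;> simp

lemma pvEventsA_mem (cp : List (Int × List (Int × Int))) (c1 : Int) (ps1 : List (Int × Int)) (c2 : Int) :
    c2 ∈ pvEventsA cp c1 ps1
      ↔ ∃ y ∈ cp, c1 ≠ y.1 ∧ c2 = y.1 ∧ ∃ p1 ∈ ps1, ∃ p2 ∈ y.2, pvAdj p1 p2 = true := by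
  simp only [pvEventsA, List.mem_flatMap]
  refine exists_congr fun y => and_congr_right fun _ => ?_
  by_cases h : (c1 == y.1) = true
  · simp_all
  · simp only [h, Bool.false_eq_true, if_false, List.mem_flatMap, List.mem_map, List.mem_filter]
    rw [beq_iff_eq] at h
    constructor
    · rintro ⟨p1, hp1, p2, ⟨hp2, hadj⟩, rfl⟩
      exact ⟨h, rfl, p1, hp1, p2, hp2, hadj⟩
    · rintro ⟨_, rfl, p1, hp1, p2, hp2, hadj⟩
      exact ⟨p1, hp1, p2, ⟨hp2, hadj⟩, rfl⟩

lemma pvEventsB_mem (pc : PySem.Dict (Int × Int) (PySem.Set Int))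
    (x : Int × (Int × Int) × (Int × Int)) (c2 : Int) :
    c2 ∈ pvEventsB pc x
      ↔ ∃ p1 ∈ [x.2.1, x.2.2], ∃ d ∈ pvDeltas,
          c2 ∈ pc.getD (p1.1 + d.1, p1.2 + d.2) PySem.Set.empty ∧ c2 ≠ x.1 := by
  simp only [pvEventsB, List.mem_flatMap, List.mem_filter, bne_iff_ne, ne_eq]

-- the two event lists have the same members
lemma pvEvents_iff (L : List (Int × (Int × Int) × (Int × Int)))
    (x : Int × (Int × Int) × (Int × Int)) (c2 : Int) :
    c2 ∈ pvEventsA (L.map (fun z => (z.1, [z.2.1, z.2.2]))) x.1 [x.2.1, x.2.2]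
      ↔ c2 ∈ pvEventsB (L.foldl (fun pc z =>
            [z.2.1, z.2.2].foldl (fun pc p =>
              pc.modify p PySem.Set.empty (fun s => PySem.Set.add s z.1)) pc)
            PySem.Dict.empty) x := by
  rw [pvEventsA_mem, pvEventsB_mem]
  constructor
  · rintro ⟨y, hy, hne, rfl, p1, hp1, p2, hp2, hadj⟩
    rcases List.mem_map.mp hy with ⟨z, hz, rfl⟩
    rcases (pvAdj_iff p1 p2).mp hadj with ⟨d, hd, rfl⟩
    refine ⟨p1, hp1, d, hd, ?_, fun h => hne (by simpa using h.symm)⟩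
    rw [pvPos_mem_gen]
    refine Or.inr ⟨z, hz, rfl, ?_⟩
    simp only [List.mem_cons, List.not_mem_nil, or_false] at hp2
    rcases hp2 with h | h
    · exact Or.inl h
    · exact Or.inr h
  · rintro ⟨p1, hp1, d, hd, hmem, hne⟩
    rw [pvPos_mem_gen] at hmem
    rcases hmem with h | ⟨z, hz, rfl, hq⟩
    · simp [PySem.Dict.getD_empty, PySem.Set.empty] at h
    · refine ⟨(z.1, [z.2.1, z.2.2]), List.mem_map.mpr ⟨z, hz, rfl⟩, fun h => hne h.symm, rfl,
        p1, hp1, (p1.1 + d.1, p1.2 + d.2), ?_, (pvAdj_iff _ _).mpr ⟨d, hd, rfl⟩⟩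
      simp only [List.mem_cons, List.not_mem_nil, or_false]
      rcases hq with h | h
      · exact Or.inl h
      · exact Or.inr h

-- same members ⇒ same isEmpty and same set size for the two event lists
lemma pvEvents_isEmpty_len (L : List (Int × (Int × Int) × (Int × Int)))
    (x : Int × (Int × Int) × (Int × Int)) :
    ((pvEventsA (L.map (fun z => (z.1, [z.2.1, z.2.2]))) x.1 [x.2.1, x.2.2]).isEmpty
        = (pvEventsB (L.foldl (fun pc z =>
            [z.2.1, z.2.2].foldl (fun pc p =>
              pc.modify p PySem.Set.empty (fun s => PySem.Set.add s z.1)) pc)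
            PySem.Dict.empty) x).isEmpty)
      ∧ PySem.Set.len (PySem.Set.ofList (pvEventsA (L.map (fun z => (z.1, [z.2.1, z.2.2]))) x.1 [x.2.1, x.2.2]))
        = PySem.Set.len (PySem.Set.ofList (pvEventsB (L.foldl (fun pc z =>
            [z.2.1, z.2.2].foldl (fun pc p =>
              pc.modify p PySem.Set.empty (fun s => PySem.Set.add s z.1)) pc)
            PySem.Dict.empty) x)) := by
  constructor
  · rw [Bool.eq_iff_iff]
    simp only [List.isEmpty_iff, List.eq_nil_iff_forall_not_mem]
    constructor
    · intro h c2 hc2; exact h c2 ((pvEvents_iff L x c2).mpr hc2)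
    · intro h c2 hc2; exact h c2 ((pvEvents_iff L x c2).mp hc2)
  · have hperm : (PySem.Set.ofList (pvEventsA (L.map (fun z => (z.1, [z.2.1, z.2.2]))) x.1 [x.2.1, x.2.2])).Perm
        (PySem.Set.ofList (pvEventsB (L.foldl (fun pc z =>
            [z.2.1, z.2.2].foldl (fun pc p =>
              pc.modify p PySem.Set.empty (fun s => PySem.Set.add s z.1)) pc)
            PySem.Dict.empty) x)) := by
      rw [List.perm_ext_iff_of_nodup (PySem.Set.nodup_ofList _) (PySem.Set.nodup_ofList _)]
      intro c2
      rw [PySem.Set.mem_ofList, PySem.Set.mem_ofList]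
      exact pvEvents_iff L x c2
    simp only [PySem.Set.len, hperm.length_eq]

-- ofList is empty iff its source list is
lemma pvOfList_eq_nil (l : List Int) : (PySem.Set.ofList l : List Int) = [] ↔ l = [] := by
  constructor
  · intro h
    cases l with
    | nil => rfl
    | cons e rest =>
      have he : e ∈ PySem.Set.ofList (e :: rest) := (PySem.Set.mem_ofList _ _).mpr (by simp)
      rw [h] at he
      simp at he
  · rintro rfl
    rfl

-- filter/map congruence used to line the two outputs up
lemma pvZip {α β : Type} (T : List α) (qA qB : α → Bool) (fA fB : α → β)
    (hq : ∀ x, qA x = qB x) (hf : ∀ x, fA x = fB x) :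
    (T.filter qA).map fA = (T.filter qB).map fB := by
  rw [List.filter_congr (fun x _ => hq x)]
  exact List.map_congr_left (fun x _ => hf x)

-- ===== VERDICT (by name: the statement is the Claim_ definition above) =====
theorem compute_degrees_spec : Claim_equal_compute_degrees := by
  intro L ROWS COLS _
  show compute_degrees L ROWS COLS = compute_degrees_alt L ROWS COLS
  simp only [compute_degrees, compute_degrees_alt]
  set items := (PySem.Dict.ofList L).items with hitems
  set cp : List (Int × List (Int × Int)) := items.map (fun x => (x.1, [x.2.1, x.2.2])) with hcp
  set pcb := items.foldl (fun pc z =>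
      [z.2.1, z.2.2].foldl (fun pc p =>
        pc.modify p PySem.Set.empty (fun s => PySem.Set.add s z.1)) pc)
      PySem.Dict.empty with hpcb
  -- A's side
  have hndcp : (cp.map (·.1)).Nodup := by
    rw [hcp, List.map_map]
    exact PySem.Dict.nodup_keys_ofList L
  rw [pvA_outer cp cp PySem.Dict.empty hndcp (by simp)
    (fun x _ => PySem.Dict.contains_empty x.1)]
  -- B's side: rewrite each loop body, then extract the appends
  rw [PySem.List.foldl_congr_mem items _
    (fun res x => if !(pvEventsB pcb x).isEmpty
      then res ++ [(x.1, PySem.Set.len (PySem.Set.ofList (pvEventsB pcb x)))]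
      else res) []
    (by
      intro acc x _
      rw [pvB_neigh]
      by_cases h : pvEventsB pcb x = []
      · simp [h]
      · have h1 : (PySem.Set.ofList (pvEventsB pcb x) : List Int) ≠ [] :=
          fun hc => h ((pvOfList_eq_nil _).mp hc)
        simp [List.isEmpty_iff, h, h1])]
  rw [PySem.List.foldl_append_if]
  -- both sides are map-of-filter over the same base list
  rw [hcp, List.filter_map, List.map_map]
  have hsets := fun x => pvEvents_isEmpty_len items x
  rw [← hcp, ← hpcb] at hsets
  simp only [List.nil_append, Function.comp_def]
  have hempty : PySem.Dict.empty.items = ([] : List (Int × PySem.Set Int)) := rfl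
  rw [hempty, List.nil_append]
  rw [List.map_map]
  simp only [Function.comp_def]
  refine pvZip items _ _ _ _ (fun x => ?_) (fun x => ?_)
  · show (!(pvEventsA cp x.1 [x.2.1, x.2.2]).isEmpty) = !(pvEventsB pcb x).isEmpty
    rw [(hsets x).1]
  · show (x.1, (PySem.Set.ofList (pvEventsA cp x.1 [x.2.1, x.2.2])).len)
        = (x.1, (PySem.Set.ofList (pvEventsB pcb x)).len)
    rw [(hsets x).2]
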